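-- pv_equiv track=rewrite | github.com/Hinneman/blender-model-optimizer | build.py | extract_leading_docstring
-- ===== SOURCE A (Python) =====
-- def extract_leading_docstring(source):
--     """Return the leading triple-quoted docstring, or empty string."""
--     stripped = source.lstrip()
--     for quote in ('"""', "'''"):
--         if stripped.startswith(quote):
--             end = stripped.find(quote, 3)
--             if end != -1:
--                 return stripped[: end + 3]
--     return ""
-- ===== SOURCE B (Python) =====
-- def extract_leading_docstring(source):
--     """Return the leading triple-quoted docstring, or empty string."""
--     s = source.lstrip()
--     if s[:3] not in ('"""', "'''"):
--         return ""
--     q = s[0]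
--     run = 0
--     for i in range(3, len(s)):
--         if s[i] == q:
--             run += 1
--             if run == 3:
--                 return s[: i + 1]
--         else:
--             run = 0
--     return ""
-- ===== Notes on version B (the rewrite author's own statement) =====
-- stated objective: alternative
-- what changed: Replaces A's startswith/str.find substring search for the closing delimiter by a single character-level automaton: one pass over the stripped string keeping a run counter of consecutive quote characters, returning the prefix as soon as the run reaches 3.
import Mathlib
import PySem

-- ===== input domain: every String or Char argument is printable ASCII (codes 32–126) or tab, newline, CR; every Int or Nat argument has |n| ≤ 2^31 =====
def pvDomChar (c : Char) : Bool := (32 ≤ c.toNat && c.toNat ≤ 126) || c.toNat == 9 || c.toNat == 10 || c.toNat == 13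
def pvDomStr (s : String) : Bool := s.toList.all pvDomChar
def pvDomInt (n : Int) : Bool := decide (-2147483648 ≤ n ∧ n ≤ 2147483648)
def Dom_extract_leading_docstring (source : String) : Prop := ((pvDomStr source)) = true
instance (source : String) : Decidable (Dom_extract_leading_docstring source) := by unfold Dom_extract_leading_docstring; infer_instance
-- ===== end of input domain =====

-- B replaces A's startswith/str.find substring search by a single character-level
-- automaton over the stripped string: a run counter of consecutive quote characters,
-- returning the prefix as soon as the run reaches 3 (alternative algorithm, same cost).

-- ===== PORT A =====
-- the 'for quote in (...)' loop of A, one clause per iteration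
def pvALoop (stripped : String) : List String → String
  | [] => ""
  | q :: qs =>
    if PySem.Str.startswith stripped q then
      let e := PySem.Str.findFrom stripped q 3
      if e ≠ -1 then PySem.Str.slice stripped none (some (e + 3))
      else pvALoop stripped qs
    else pvALoop stripped qs

def extract_leading_docstring (source : String) : String :=
  pvALoop (PySem.Str.lstrip source) ["\"\"\"", "'''"]

-- ===== PORT B =====
-- Source B's 'for i in range(3, len(s))' loop with state 'run': recursion over the
-- characters s[3:], carrying the index i and the run counter; some i = the 'return s[:i+1]'
def pvScan (q : Char) : List Char → Nat → Nat → Option Nat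
  | [], _, _ => none
  | c :: rest, i, run =>
    if c = q then
      if run + 1 = 3 then some i else pvScan q rest (i + 1) (run + 1)
    else pvScan q rest (i + 1) 0

def extract_leading_docstring_alt (source : String) : String :=
  let cs := (PySem.Str.lstrip source).toList
  if cs.take 3 = ['"', '"', '"'] ∨ cs.take 3 = ['\'', '\'', '\''] then
    match pvScan (cs.headD ' ') (cs.drop 3) 3 0 with
    | some i => String.ofList (cs.take (i + 1))
    | none => ""
  else ""

-- ===== PRECONDITION & SPEC =====
def Spec_extract_leading_docstring (source : String) (out : String) : Prop := out = extract_leading_docstring_alt source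
instance (source : String) (out : String) : Decidable (Spec_extract_leading_docstring source out) := by unfold Spec_extract_leading_docstring; infer_instance

-- ===== CLAIM =====
def Claim_equal_extract_leading_docstring : Prop := ∀ (source : String), Dom_extract_leading_docstring source → Spec_extract_leading_docstring source (extract_leading_docstring source)

-- ===== LEMMAS AND PROOFS =====

-- find on (replicate run q ++ c :: rest) with c ≠ q: no match can start inside the
-- short q-run, so the first match is run+1 plus the first match in rest
lemma pv_find_repl_cons (q c : Char) (rest : List Char) (run : Nat)
    (hc : c ≠ q) (hrun : run ≤ 2) :
    PySem.Chars.find (List.replicate run q ++ c :: rest) [q, q, q] =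
      (if PySem.Chars.find rest [q, q, q] = -1 then -1
       else ((run + 1 : Nat) : Int) + PySem.Chars.find rest [q, q, q]) := by
  set X := List.replicate run q ++ c :: rest with hXdef
  have hdrop : ∀ k, X.drop (run + 1 + k) = rest.drop k := by
    intro k
    have h1 : X = (List.replicate run q ++ [c]) ++ rest := by simp [hXdef]
    have hlen : (List.replicate run q ++ [c]).length = run + 1 := by simp
    calc X.drop (run + 1 + k) = (X.drop (run + 1)).drop k := by rw [List.drop_drop]
      _ = rest.drop k := by
          rw [h1, ← hlen, List.drop_left]
  have hearly : ∀ j, j ≤ run → ¬ ([q, q, q] <+: X.drop j) := by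
    intro j hj h
    have hXd : X.drop j = List.replicate (run - j) q ++ c :: rest := by
      rw [hXdef, List.drop_append_of_le_length (by simp [hj]), List.drop_replicate]
    have h' : [q, q, q] <+: List.replicate (run - j) q ++ c :: rest := hXd ▸ h
    have hidx : run - j < ([q, q, q] : List Char).length := by simp; omega
    have this := h'.getElem hidx
    have hval : ([q, q, q] : List Char)[run - j]'hidx = c := by
      rw [this, List.getElem_append_right (by simp)]
      simp
    have hq : ([q, q, q] : List Char)[run - j]'hidx = q := by
      have h3 : run - j < 3 := by omega
      interval_cases h : (run - j) <;> simp
    rw [hq] at hval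
    exact hc hval.symm
  have hmem : ∀ j, ([q, q, q] <+: X.drop j) → run + 1 ≤ j → [q, q, q] <+: rest.drop (j - (run + 1)) := by
    intro j h hge
    have : run + 1 + (j - (run + 1)) = j := by omega
    rw [← this, hdrop] at h
    exact h
  by_cases hg : PySem.Chars.find rest [q, q, q] = -1
  · rw [if_pos hg]
    apply (PySem.Chars.find_eq_neg_one_iff _ _).mpr
    intro hinf
    obtain ⟨j, hj⟩ := ((PySem.Chars.exists_prefix_drop_iff_isIn _ _).mpr
      ((PySem.Chars.isIn_iff_infix _ _).mpr hinf))
    by_cases hle : j ≤ run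
    · exact hearly j hle hj
    · have hrinf : [q, q, q] <:+: rest := by
        have := hmem j hj (by omega)
        exact (PySem.Chars.isIn_iff_infix _ _).mp
          ((PySem.Chars.exists_prefix_drop_iff_isIn _ _).mp ⟨_, this⟩)
      exact (PySem.Chars.find_eq_neg_one_iff _ _).mp hg hrinf
  · rw [if_neg hg]
    have hgge : 0 ≤ PySem.Chars.find rest [q, q, q] := by
      have := PySem.Chars.neg_one_le_find rest [q, q, q]
      omega
    have gspec := PySem.Chars.find_spec hgge
    set g := PySem.Chars.find rest [q, q, q] with hgdef
    have hM : [q, q, q] <+: X.drop (run + 1 + g.toNat) := by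
      rw [hdrop]; exact gspec.1
    have hXinf : [q, q, q] <:+: X :=
      (PySem.Chars.isIn_iff_infix _ _).mp
        ((PySem.Chars.exists_prefix_drop_iff_isIn _ _).mp ⟨_, hM⟩)
    have hfge : 0 ≤ PySem.Chars.find X [q, q, q] :=
      (PySem.Chars.find_nonneg_iff _ _).mpr hXinf
    have fspec := PySem.Chars.find_spec hfge
    set f := PySem.Chars.find X [q, q, q] with hfdef
    have h1 : ¬ (f.toNat < run + 1 + g.toNat) := by
      intro hlt
      by_cases hle : f.toNat ≤ run
      · exact hearly f.toNat hle fspec.1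
      · have hk := hmem f.toNat fspec.1 (by omega)
        exact gspec.2 (f.toNat - (run + 1)) (by omega) hk
    have h2 : ¬ (run + 1 + g.toNat < f.toNat) := fun hlt => fspec.2 _ hlt hM
    omega

-- the automaton loop computes (shifted) the first occurrence str.find computes
lemma pv_scan_eq_find (q : Char) (l : List Char) :
    ∀ (i run : Nat), run ≤ 2 → run ≤ i →
    pvScan q l i run =
      (if PySem.Chars.find (List.replicate run q ++ l) [q, q, q] = -1 then none
       else some (i - run + (PySem.Chars.find (List.replicate run q ++ l) [q, q, q]).toNat + 2)) := by
  induction l with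
  | nil =>
    intro i run hrun hi
    have hni : ¬ ([q, q, q] <:+: List.replicate run q) := by
      intro h
      have := h.length_le
      simp at this
      omega
    rw [List.append_nil, if_pos ((PySem.Chars.find_eq_neg_one_iff _ _).mpr hni)]
    rfl
  | cons c rest ih =>
    intro i run hrun hi
    by_cases hcq : c = q
    · subst hcq
      by_cases h3 : run + 1 = 3
      · have hrun2 : run = 2 := by omega
        subst hrun2
        have hX : List.replicate 2 c ++ c :: rest = [c, c, c] ++ rest := by
          simp [List.replicate]
        have hpref : [c, c, c] <+: List.replicate 2 c ++ c :: rest := by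
          rw [hX]; exact ⟨rest, rfl⟩
        have hinf : [c, c, c] <:+: List.replicate 2 c ++ c :: rest := hpref.isInfix
        have hge : 0 ≤ PySem.Chars.find (List.replicate 2 c ++ c :: rest) [c, c, c] :=
          (PySem.Chars.find_nonneg_iff _ _).mpr hinf
        have hspec := PySem.Chars.find_spec hge
        have hzero : (PySem.Chars.find (List.replicate 2 c ++ c :: rest) [c, c, c]).toNat = 0 := by
          by_contra hne
          exact (hspec.2 0 (by omega)) (by simpa using hpref)
        have hfind : PySem.Chars.find (List.replicate 2 c ++ c :: rest) [c, c, c] = 0 := by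
          omega
        rw [pvScan, if_pos rfl, if_pos rfl, hfind, if_neg (by norm_num)]
        simp
        omega
      · have hrun1 : run + 1 ≤ 2 := by omega
        have hrw : List.replicate run c ++ c :: rest = List.replicate (run + 1) c ++ rest := by
          rw [List.replicate_succ']
          simp
        rw [pvScan, if_pos rfl, if_neg h3, ih (i + 1) (run + 1) hrun1 (by omega), hrw]
        simp [Nat.succ_sub_succ]
    · rw [pvScan, if_neg hcq, ih (i + 1) 0 (by omega) (by omega),
        pv_find_repl_cons q c rest run hcq hrun]
      simp only [List.replicate, List.nil_append]
      by_cases hg : PySem.Chars.find rest [q, q, q] = -1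
      · simp [hg]
      · have hge : 0 ≤ PySem.Chars.find rest [q, q, q] := by
          have := PySem.Chars.neg_one_le_find rest [q, q, q]
          omega
        rw [if_neg hg, if_neg (by omega)]
        congr 1
        omega

-- one quote candidate: A's find-based branch equals B's automaton arm
lemma pv_branch (s : String) (q : Char) (hpre : s.toList.take 3 = [q, q, q]) :
    (if PySem.Str.findFrom s (String.ofList [q, q, q]) 3 ≠ -1
     then PySem.Str.slice s none (some (PySem.Str.findFrom s (String.ofList [q, q, q]) 3 + 3))
     else "")
    = match pvScan q (s.toList.drop 3) 3 0 with
      | some i => String.ofList (s.toList.take (i + 1))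
      | none => "" := by
  have hlen : 3 ≤ s.toList.length := by
    have hl := congrArg List.length hpre
    rw [List.length_take] at hl
    simp only [List.length_cons, List.length_nil] at hl
    omega
  have hff : PySem.Str.findFrom s (String.ofList [q, q, q]) 3 =
      (if PySem.Chars.find (s.toList.drop 3) [q, q, q] = -1 then -1
       else 3 + PySem.Chars.find (s.toList.drop 3) [q, q, q]) := by
    rw [PySem.Str.findFrom_eq]
    have h3n : (3 : Int) = ((3 : Nat) : Int) := by norm_num
    rw [h3n, PySem.Chars.findFrom_natCast s.toList _ 3 hlen]
    simp
  have hscan := pv_scan_eq_find q (s.toList.drop 3) 3 0 (by omega) (by omega)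
  simp only [List.replicate, List.nil_append] at hscan
  by_cases hg : PySem.Chars.find (s.toList.drop 3) [q, q, q] = -1
  · rw [hff, if_pos hg, if_neg (by simp), hscan, if_pos hg]
  · have hge : 0 ≤ PySem.Chars.find (s.toList.drop 3) [q, q, q] := by
      have := PySem.Chars.neg_one_le_find (s.toList.drop 3) [q, q, q]
      omega
    set f := PySem.Chars.find (s.toList.drop 3) [q, q, q] with hf
    rw [hff, if_neg hg, if_pos (by omega), hscan, if_neg hg]
    apply String.toList_inj.mp
    rw [PySem.Str.toList_slice]
    have hb : (3 : Int) + f + 3 = ((f.toNat + 6 : Nat) : Int) := by omega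
    rw [hb]
    simp only [PySem.Chars.slice_eq_listSlice, PySem.List.slice_to_natCast,
      String.toList_ofList]
    congr 1
    omega

-- A's startswith test is the take-3 comparison
lemma pv_startswith_iff (s : String) (q : List Char) (hq : q.length = 3) :
    PySem.Str.startswith s (String.ofList q) = true ↔ s.toList.take 3 = q := by
  rw [PySem.Str.startswith_eq, PySem.Chars.startswith_iff, String.toList_ofList,
    List.prefix_iff_eq_take, hq]
  exact ⟨fun h => h.symm, fun h => h.symm⟩

lemma pv_headD (cs : List Char) (q : Char) (h : cs.take 3 = [q, q, q]) :
    cs.headD ' ' = q := by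
  cases cs with
  | nil => simp at h
  | cons a t => simp [List.take] at h ⊢; exact h.1

-- the whole function on an arbitrary (already lstripped) string
lemma pv_core (s : String) :
    pvALoop s ["\"\"\"", "'''"] =
      (if s.toList.take 3 = ['"', '"', '"'] ∨ s.toList.take 3 = ['\'', '\'', '\''] then
        match pvScan (s.toList.headD ' ') (s.toList.drop 3) 3 0 with
        | some i => String.ofList (s.toList.take (i + 1))
        | none => ""
      else "") := by
  have hqq : ("\"\"\"" : String) = String.ofList ['"', '"', '"'] := by decide
  have hq' : ("'''" : String) = String.ofList ['\'', '\'', '\''] := by decide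
  by_cases h1 : s.toList.take 3 = ['"', '"', '"']
  · have hsw1 : PySem.Str.startswith s "\"\"\"" = true := by
      rw [hqq]; exact (pv_startswith_iff s _ (by decide)).mpr h1
    have hsw2 : PySem.Str.startswith s "'''" = false := by
      rw [hq']
      apply Bool.eq_false_iff.mpr; intro hc
      have h2' := (pv_startswith_iff s _ (by decide)).mp hc
      rw [h1] at h2'; revert h2'; decide
    have hb := pv_branch s '"' h1
    rw [← hqq] at hb
    simp only [pvALoop, hsw1, hsw2, Bool.false_eq_true, if_false, if_true]
    rw [if_pos (Or.inl h1), pv_headD s.toList '"' h1]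
    exact hb
  · by_cases h2 : s.toList.take 3 = ['\'', '\'', '\'']
    · have hsw1 : PySem.Str.startswith s "\"\"\"" = false := by
        rw [hqq]; apply Bool.eq_false_iff.mpr; intro hc
        exact h1 ((pv_startswith_iff s _ (by decide)).mp hc)
      have hsw2 : PySem.Str.startswith s "'''" = true := by
        rw [hq']; exact (pv_startswith_iff s _ (by decide)).mpr h2
      have hb := pv_branch s '\'' h2
      rw [← hq'] at hb
      simp only [pvALoop, hsw1, hsw2, Bool.false_eq_true, if_false, if_true]
      rw [if_pos (Or.inr h2), pv_headD s.toList '\'' h2]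
      exact hb
    · have hsw1 : PySem.Str.startswith s "\"\"\"" = false := by
        rw [hqq]; apply Bool.eq_false_iff.mpr; intro hc
        exact h1 ((pv_startswith_iff s _ (by decide)).mp hc)
      have hsw2 : PySem.Str.startswith s "'''" = false := by
        rw [hq']; apply Bool.eq_false_iff.mpr; intro hc
        exact h2 ((pv_startswith_iff s _ (by decide)).mp hc)
      simp only [pvALoop, hsw1, hsw2, Bool.false_eq_true, if_false]
      rw [if_neg (by tauto)]

-- ===== VERDICT =====
theorem extract_leading_docstring_spec : Claim_equal_extract_leading_docstring := by
  intro source _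
  exact pv_core (PySem.Str.lstrip source)
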